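-- pv_equiv track=rewrite | github.com/bahar-hub/pandas-retrive-testgen | src/fetch.py | extract_examples_code
-- ===== SOURCE A (Python) =====
-- def extract_examples_code(block: str):
--     """
--     Extract code snippets from the 'Examples' section of NumPy docstrings.
--     Handles lines beginning with '>>>' or '...'.
--     """
--     if not block:
--         return []
--
--     out, buf, in_ex = [], [], False
--
--     for ln in block.splitlines():
--         t = ln.strip()
--
--         if t.startswith(">>>"):
--             in_ex = True
--             buf.append(t[4:])
--         elif in_ex and t.startswith("..."):
--             buf.append(t[4:])
--         elif in_ex and t == "":
--             # Empty line ends current example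
--             if buf:
--                 out.append("\n".join(buf).strip())
--                 buf = []
--             in_ex = False
--         else:
--             if in_ex:
--                 # Unexpected line ends current example
--                 if buf:
--                     out.append("\n".join(buf).strip())
--                     buf = []
--                 in_ex = False
--
--     if buf:
--         out.append("\n".join(buf).strip())
--
--     return out
-- ===== SOURCE B (Python) =====
-- def extract_examples_code(block: str):
--     """
--     Extract code snippets from the 'Examples' section of NumPy docstrings.
--     Handles lines beginning with '>>>' or '...'.
--     """
--     if not block:
--         return []
--
--     lines = block.splitlines()
--     n = len(lines)
--     out = []
--     i = 0
--     while i < n: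
--         # find the start of the next example
--         if not lines[i].strip().startswith(">>>"):
--             i += 1
--             continue
--         # consume the whole run of '>>>' / '...' lines as one example
--         buf = []
--         while i < n:
--             t = lines[i].strip()
--             if t.startswith(">>>") or t.startswith("..."):
--                 buf.append(t[4:])
--                 i += 1
--             else:
--                 break
--         out.append("\n".join(buf).strip())
--     return out
-- ===== Notes on version B (the rewrite author's own statement) =====
-- stated objective: alternative
-- what changed: Replaces A's single-pass in_ex flag machine (with two flush sites and an end-of-loop flush) by a nested find-start/consume-run scan with an explicit index: an outer while skips to the next '>>>' line and an inner while consumes the whole run, so no flag and no deferred buffer flushing exist.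
import Mathlib
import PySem

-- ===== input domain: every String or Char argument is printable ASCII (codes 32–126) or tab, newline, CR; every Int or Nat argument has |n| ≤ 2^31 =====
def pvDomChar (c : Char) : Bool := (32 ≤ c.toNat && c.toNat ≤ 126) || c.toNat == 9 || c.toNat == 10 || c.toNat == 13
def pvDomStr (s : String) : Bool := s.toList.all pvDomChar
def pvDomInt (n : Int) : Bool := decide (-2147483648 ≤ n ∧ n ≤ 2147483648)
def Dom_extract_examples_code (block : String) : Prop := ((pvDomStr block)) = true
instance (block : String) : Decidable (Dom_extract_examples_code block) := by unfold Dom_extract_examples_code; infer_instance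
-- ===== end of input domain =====

-- B replaces A's in_ex flag machine by a nested find-start/consume-run scan (alternative decomposition, same cost).

-- ===== PORT A =====
-- A's for-loop over splitlines with state (out, buf, in_ex), as the obvious structural recursion;
-- the trailing 'if buf: out.append(...)' flush is the base case.
def pvLoopA : List String → List String → List String → Bool → List String
  | [], out, buf, _ =>
      if buf.isEmpty then out else out ++ [PySem.Str.strip (PySem.Str.join "\n" buf)]
  | ln :: rest, out, buf, inEx =>
      let t := PySem.Str.strip ln
      if PySem.Str.startswith t ">>>" then
        pvLoopA rest out (buf ++ [PySem.Str.slice t (some 4) none]) true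
      else if inEx && PySem.Str.startswith t "..." then
        pvLoopA rest out (buf ++ [PySem.Str.slice t (some 4) none]) true
      else if inEx && (t == "") then
        pvLoopA rest (if buf.isEmpty then out else out ++ [PySem.Str.strip (PySem.Str.join "\n" buf)]) [] false
      else
        if inEx then
          pvLoopA rest (if buf.isEmpty then out else out ++ [PySem.Str.strip (PySem.Str.join "\n" buf)]) [] false
        else
          pvLoopA rest out buf inEx

def extract_examples_code (block : String) : List String :=
  if block == "" then []
  else pvLoopA (PySem.Str.splitlines block) [] [] false

-- ===== PORT B =====
-- inner while: consume the run of '>>>'/'...' lines into buf, return (buf, remaining lines)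
def pvCollectB : List String → List String → List String × List String
  | [], buf => (buf, [])
  | ln :: rest, buf =>
      let t := PySem.Str.strip ln
      if PySem.Str.startswith t ">>>" || PySem.Str.startswith t "..." then
        pvCollectB rest (buf ++ [PySem.Str.slice t (some 4) none])
      else
        (buf, ln :: rest)

theorem pvCollectB_snd_length : ∀ (lines buf : List String), (pvCollectB lines buf).2.length ≤ lines.length := by
  intro lines
  induction lines with
  | nil => intro buf; simp [pvCollectB]
  | cons ln rest ih =>
      intro buf
      simp only [pvCollectB]
      split
      · exact le_trans (ih _) (by simp)
      · simp

-- outer while: skip lines until one whose strip starts with '>>>', then consume the run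
-- (the first inner-loop iteration consumes that very line, so the recursive call starts at rest)
def pvSkipB : List String → List String
  | [] => []
  | ln :: rest =>
      let t := PySem.Str.strip ln
      if PySem.Str.startswith t ">>>" then
        let c := pvCollectB rest [PySem.Str.slice t (some 4) none]
        PySem.Str.strip (PySem.Str.join "\n" c.1) :: pvSkipB c.2
      else
        pvSkipB rest
  termination_by lines => lines.length
  decreasing_by
  · exact Nat.lt_succ_of_le (pvCollectB_snd_length rest _)
  · simp

def extract_examples_code_alt (block : String) : List String :=
  if block == "" then []
  else pvSkipB (PySem.Str.splitlines block)

-- ===== PRECONDITION & SPEC =====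
def Spec_extract_examples_code (block : String) (out : List String) : Prop := out = extract_examples_code_alt block
instance (block : String) (out : List String) : Decidable (Spec_extract_examples_code block out) := by unfold Spec_extract_examples_code; infer_instance

-- ===== CLAIM (what is proved, stated in full; the proofs are below) =====
def Claim_equal_extract_examples_code : Prop := ∀ (block : String), Dom_extract_examples_code block → Spec_extract_examples_code block (extract_examples_code block)

-- ===== LEMMAS AND PROOFS =====

theorem pvSkipB_cons (ln : String) (rest : List String) :
    pvSkipB (ln :: rest) =
      (if PySem.Str.startswith (PySem.Str.strip ln) ">>>" then
        PySem.Str.strip (PySem.Str.join "\n" (pvCollectB rest [PySem.Str.slice (PySem.Str.strip ln) (some 4) none]).1)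
          :: pvSkipB (pvCollectB rest [PySem.Str.slice (PySem.Str.strip ln) (some 4) none]).2
      else pvSkipB rest) := by
  conv_lhs => rw [pvSkipB.eq_def]

-- Simultaneous characterisation of A's flag machine:
-- in skip mode (buf = [], in_ex = false) it computes out ++ pvSkipB lines;
-- in collect mode (buf ≠ [], in_ex = true) it finishes the current example via pvCollectB and continues with pvSkipB.
theorem pvLoopA_eq : ∀ (lines : List String),
    (∀ out, pvLoopA lines out [] false = out ++ pvSkipB lines) ∧
    (∀ out buf, buf ≠ [] →
      pvLoopA lines out buf true =
        out ++ [PySem.Str.strip (PySem.Str.join "\n" (pvCollectB lines buf).1)] ++ pvSkipB (pvCollectB lines buf).2) := by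
  intro lines
  induction lines with
  | nil =>
      constructor
      · intro out; simp [pvLoopA, pvSkipB]
      · intro out buf hbuf
        simp [pvLoopA, pvCollectB, pvSkipB, List.isEmpty_eq_false_iff.mpr hbuf]
  | cons ln rest ih =>
      obtain ⟨ihSkip, ihCol⟩ := ih
      constructor
      · intro out
        rw [pvLoopA, pvSkipB_cons]
        by_cases hgt : PySem.Str.startswith (PySem.Str.strip ln) ">>>" = true
        · simp only [hgt, if_true, List.nil_append]
          rw [ihCol out [PySem.Str.slice (PySem.Str.strip ln) (some 4) none] (by simp)]
          simp
        · rw [if_neg hgt, if_neg hgt]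
          simp only [Bool.false_and, Bool.false_eq_true, if_false]
          exact ihSkip out
      · intro out buf hbuf
        have hne : buf.isEmpty = false := List.isEmpty_eq_false_iff.mpr hbuf
        rw [pvLoopA, pvCollectB]
        by_cases hgt : PySem.Str.startswith (PySem.Str.strip ln) ">>>" = true
        · simp only [hgt, if_true, Bool.true_or]
          rw [ihCol out (buf ++ [PySem.Str.slice (PySem.Str.strip ln) (some 4) none]) (by simp)]
        · by_cases hdot : PySem.Str.startswith (PySem.Str.strip ln) "..." = true
          · simp only [hgt, hdot, Bool.true_and, if_true, Bool.false_or, Bool.false_eq_true, if_false]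
            rw [ihCol out (buf ++ [PySem.Str.slice (PySem.Str.strip ln) (some 4) none]) (by simp)]
          · -- the run ends here: A flushes and returns to skip mode; B closes the example
            -- and B's outer loop then skips this very line (it starts with neither '>>>' nor '...')
            have hskip : pvSkipB (ln :: rest) = pvSkipB rest := by
              rw [pvSkipB_cons, if_neg hgt]
            simp only [hgt, hdot, hne, Bool.true_and, Bool.false_or, Bool.false_eq_true, if_false,
              ihSkip, hskip, List.append_assoc]
            by_cases hemp : (PySem.Str.strip ln == "") = true
            · simp [hemp]
            · simp [hemp]

-- ===== VERDICT (by name: the statement is the Claim_ definition above) =====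
theorem extract_examples_code_spec : Claim_equal_extract_examples_code := by
  intro block _
  unfold Spec_extract_examples_code extract_examples_code extract_examples_code_alt
  by_cases h : (block == "") = true
  · simp [h]
  · simp only [h]
    simpa using (pvLoopA_eq (PySem.Str.splitlines block)).1 []
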